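-- pv_equiv track=rewrite | github.com/aic-holdings/archguard | src/symmetra/ai_guidance.py | _suggest_patterns
-- ===== SOURCE A (Python) =====
-- from typing import Dict, List, Any, Optional
--
-- def _suggest_patterns(action: str, context: str) -> List[str]:
--     """Suggest relevant architectural patterns"""
--     patterns = []
--     action_lower = action.lower()
--     context_lower = context.lower()
--
--     if 'auth' in action_lower:
--         patterns.extend(["JWT Token Pattern", "OAuth 2.0", "Session Management"])
--
--     if 'api' in action_lower:
--         patterns.extend(["REST API", "Repository Pattern", "DTO Pattern"])
--
--     if 'database' in action_lower:
--         patterns.extend(["Repository Pattern", "Unit of Work", "Active Record"])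
--
--     if any(word in action_lower for word in ['large', 'complex', 'enterprise']):
--         patterns.extend(["Microservices", "CQRS", "Event Sourcing"])
--
--     if 'cache' in action_lower:
--         patterns.extend(["Cache-Aside", "Write-Through Cache", "Cache Abstraction"])
--
--     return patterns[:3]  # Limit to top 3 suggestions
-- ===== SOURCE B (Python) =====
-- # Each rule contributes exactly 3 patterns and the result is capped at 3,
-- # so the answer is always the pattern triple of the FIRST matching rule.
-- _RULES = [
--     (('auth',), ["JWT Token Pattern", "OAuth 2.0", "Session Management"]),
--     (('api',), ["REST API", "Repository Pattern", "DTO Pattern"]),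
--     (('database',), ["Repository Pattern", "Unit of Work", "Active Record"]),
--     (('large', 'complex', 'enterprise'), ["Microservices", "CQRS", "Event Sourcing"]),
--     (('cache',), ["Cache-Aside", "Write-Through Cache", "Cache Abstraction"]),
-- ]
--
-- def _suggest_patterns(action: str, context: str):
--     action_lower = action.lower()
--     return next((pats for keywords, pats in _RULES
--                  if any(k in action_lower for k in keywords)), [])
-- ===== Notes on version B (the rewrite author's own statement) =====
-- stated objective: simpler
-- what changed: Exploits that every branch of A contributes exactly 3 patterns while the result is capped at 3: B does a first-match lookup over a rules table and returns that rule's pattern triple directly, with no accumulator and no slicing; context stays unused as in A.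
import Mathlib
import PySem

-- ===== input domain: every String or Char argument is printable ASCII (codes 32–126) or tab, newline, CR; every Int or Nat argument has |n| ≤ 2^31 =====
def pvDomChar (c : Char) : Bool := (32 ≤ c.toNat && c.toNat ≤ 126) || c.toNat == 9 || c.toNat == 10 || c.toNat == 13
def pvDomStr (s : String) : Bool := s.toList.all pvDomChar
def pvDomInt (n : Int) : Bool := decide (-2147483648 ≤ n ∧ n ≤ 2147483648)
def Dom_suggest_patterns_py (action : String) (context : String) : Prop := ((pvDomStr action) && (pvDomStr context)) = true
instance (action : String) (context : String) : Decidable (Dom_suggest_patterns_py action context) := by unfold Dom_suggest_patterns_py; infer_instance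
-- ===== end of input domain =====

-- B exploits that every branch of A adds exactly 3 patterns while the result is capped at 3:
-- it returns the pattern triple of the FIRST matching rule (first-match lookup, no accumulator,
-- no slicing).  Objective: simpler.  context is unused in both.

-- ===== PORT A =====
def suggest_patterns_py (action : String) (context : String) : List String :=
  let patterns : List String := []
  let action_lower := PySem.Str.lower action
  let _context_lower := PySem.Str.lower context
  let patterns := if PySem.Str.isIn "auth" action_lower then
      patterns ++ ["JWT Token Pattern", "OAuth 2.0", "Session Management"] else patterns
  let patterns := if PySem.Str.isIn "api" action_lower then
      patterns ++ ["REST API", "Repository Pattern", "DTO Pattern"] else patterns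
  let patterns := if PySem.Str.isIn "database" action_lower then
      patterns ++ ["Repository Pattern", "Unit of Work", "Active Record"] else patterns
  let patterns := if (["large", "complex", "enterprise"].any
      (fun word => PySem.Str.isIn word action_lower)) then
      patterns ++ ["Microservices", "CQRS", "Event Sourcing"] else patterns
  let patterns := if PySem.Str.isIn "cache" action_lower then
      patterns ++ ["Cache-Aside", "Write-Through Cache", "Cache Abstraction"] else patterns
  PySem.List.slice patterns none (some 3)

-- ===== PORT B =====
def pvRules : List (List String × List String) :=
  [ (["auth"], ["JWT Token Pattern", "OAuth 2.0", "Session Management"]),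
    (["api"], ["REST API", "Repository Pattern", "DTO Pattern"]),
    (["database"], ["Repository Pattern", "Unit of Work", "Active Record"]),
    (["large", "complex", "enterprise"], ["Microservices", "CQRS", "Event Sourcing"]),
    (["cache"], ["Cache-Aside", "Write-Through Cache", "Cache Abstraction"]) ]

def suggest_patterns_py_alt (action : String) (context : String) : List String :=
  let action_lower := PySem.Str.lower action
  match pvRules.find? (fun rule => rule.1.any (fun k => PySem.Str.isIn k action_lower)) with
  | some rule => rule.2
  | none => []

-- ===== PRECONDITION & SPEC =====
def Spec_suggest_patterns_py (action : String) (context : String) (out : List String) : Prop := out = suggest_patterns_py_alt action context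
instance (action : String) (context : String) (out : List String) : Decidable (Spec_suggest_patterns_py action context out) := by unfold Spec_suggest_patterns_py; infer_instance

-- ===== CLAIM (what is proved, stated in full; the proofs are below) =====
def Claim_equal_suggest_patterns_py : Prop := ∀ (action : String) (context : String), Dom_suggest_patterns_py action context → Spec_suggest_patterns_py action context (suggest_patterns_py action context)

-- ===== LEMMAS AND PROOFS =====

-- ===== VERDICT (by name: the statement is the Claim_ definition above) =====
theorem suggest_patterns_py_spec : Claim_equal_suggest_patterns_py := by
  intro action context _
  unfold Spec_suggest_patterns_py suggest_patterns_py suggest_patterns_py_alt pvRules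
  cases h1 : PySem.Str.isIn "auth" (PySem.Str.lower action) <;>
  cases h2 : PySem.Str.isIn "api" (PySem.Str.lower action) <;>
  cases h3 : PySem.Str.isIn "database" (PySem.Str.lower action) <;>
  cases h4 : (["large", "complex", "enterprise"].any
      (fun word => PySem.Str.isIn word (PySem.Str.lower action))) <;>
  cases h5 : PySem.Str.isIn "cache" (PySem.Str.lower action) <;>
  simp only [List.find?, List.any_cons, List.any_nil, Bool.or_false, h1, h2, h3, h4, h5,
    cond_true, cond_false, if_true, if_false] <;> decide
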